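-- pv_equiv track=rewrite | github.com/DNYoussef/familiar-gm-assistant | src/misplaced/queen_coordinator.py | _assess_division_priority
-- ===== SOURCE A (Python) =====
-- from typing import Dict, List, Optional, Tuple, Any, Set
--
-- def _assess_division_priority(causes: List[Dict[str, Any]]) -> str:
--     """Assess priority level for a division based on its root causes."""
--
--     # Check for critical patterns
--     for cause in causes:
--         if cause["fix_complexity"] == "high" or "critical" in cause["pattern_type"]:
--             return "high"
--
--     # Check for medium complexity patterns
--     for cause in causes:
--         if cause["fix_complexity"] == "medium":
--             return "medium"
--
--     return "low"
-- ===== SOURCE B (Python) =====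
-- def _assess_division_priority(causes):
--     """Assess priority level for a division based on its root causes (single pass)."""
--     saw_medium = False
--     for cause in causes:
--         if cause["fix_complexity"] == "high" or "critical" in cause["pattern_type"]:
--             return "high"
--         if cause["fix_complexity"] == "medium":
--             saw_medium = True
--     return "medium" if saw_medium else "low"
-- ===== Notes on version B (the rewrite author's own statement) =====
-- stated objective: simpler
-- what changed: B replaces A's two sequential scans over causes with a single pass that returns 'high' at the first critical/high cause and otherwise records a saw_medium flag, deciding medium/low after the loop.
import Mathlib
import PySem

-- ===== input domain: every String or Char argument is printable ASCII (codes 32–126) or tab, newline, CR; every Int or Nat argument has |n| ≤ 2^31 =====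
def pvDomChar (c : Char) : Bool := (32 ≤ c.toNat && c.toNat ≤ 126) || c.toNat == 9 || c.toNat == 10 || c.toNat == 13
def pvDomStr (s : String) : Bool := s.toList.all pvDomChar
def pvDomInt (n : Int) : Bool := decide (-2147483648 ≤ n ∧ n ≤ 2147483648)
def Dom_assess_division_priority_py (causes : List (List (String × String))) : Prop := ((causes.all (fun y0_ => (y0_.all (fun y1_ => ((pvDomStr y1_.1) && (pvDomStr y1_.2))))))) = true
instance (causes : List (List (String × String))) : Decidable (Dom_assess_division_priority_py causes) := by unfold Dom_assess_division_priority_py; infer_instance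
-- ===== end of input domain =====

-- B: one pass over `causes` with a saw_medium flag instead of A's two sequential scans; same return value.


-- dict lookup on an association list: first matching key (KeyError = none; excluded by Pre_)
def pvGetKey (d : List (String × String)) (k : String) : Option String :=
  (d.find? (fun p => p.1 == k)).map (·.2)

-- ===== PORT A =====
-- the branch test of A's first loop: cause["fix_complexity"] == "high" or "critical" in cause["pattern_type"]
def pvATrig (cause : List (String × String)) : Bool :=
  (pvGetKey cause "fix_complexity").getD "" == "high"
    || PySem.Str.isIn "critical" ((pvGetKey cause "pattern_type").getD "")

-- first loop of A: returns some "high" at the first critical/high cause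
def pvALoop1 : List (List (String × String)) → Option String
  | [] => none
  | cause :: rest => if pvATrig cause then some "high" else pvALoop1 rest

-- second loop of A: returns "medium" at the first medium cause, else "low"
def pvALoop2 : List (List (String × String)) → String
  | [] => "low"
  | cause :: rest =>
    if ((pvGetKey cause "fix_complexity").getD "" == "medium") then "medium"
    else pvALoop2 rest

def assess_division_priority_py (causes : List (List (String × String))) : String :=
  match pvALoop1 causes with
  | some r => r
  | none => pvALoop2 causes

-- ===== PORT B =====
-- B's branch tests (written out as in Source B; they coincide with A's by rfl)
def pvBTrig (cause : List (String × String)) : Bool :=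
  (pvGetKey cause "fix_complexity").getD "" == "high"
    || PySem.Str.isIn "critical" ((pvGetKey cause "pattern_type").getD "")

def pvBMed (cause : List (String × String)) : Bool :=
  (pvGetKey cause "fix_complexity").getD "" == "medium"

-- single pass carrying the saw_medium flag
def pvBLoop : List (List (String × String)) → Bool → String
  | [], saw_medium => if saw_medium then "medium" else "low"
  | cause :: rest, saw_medium =>
    if pvBTrig cause then "high"
    else pvBLoop rest (saw_medium || pvBMed cause)

def assess_division_priority_py_alt (causes : List (List (String × String))) : String :=
  pvBLoop causes false

-- ===== PRECONDITION & SPEC =====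
-- helpers for Pre_ only (independent of the ports)
def pvHasKey (c : List (String × String)) (k : String) : Bool := c.any (fun p => p.1 == k)
-- a cause whose key reads all succeed under A's short-circuit: "fix_complexity" present, and
-- "pattern_type" also present unless fix_complexity == "high" (which returns before reading it)
def pvWF (c : List (String × String)) : Bool :=
  pvHasKey c "fix_complexity"
    && ((pvGetKey c "fix_complexity").getD "" == "high" || pvHasKey c "pattern_type")
-- the first-loop branch test, total via getD (only consulted on positions after well-formed ones)
def pvTrig (c : List (String × String)) : Bool :=
  (pvGetKey c "fix_complexity").getD "" == "high"
    || PySem.Str.isIn "critical" ((pvGetKey c "pattern_type").getD "")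
-- exactly the inputs on which Python A returns (no KeyError): every cause up to and including the
-- first triggering cause is well-formed; causes after an early "high" return are never read.
def Pre_assess_division_priority_py (causes : List (List (String × String))) : Prop :=
  ((List.range causes.length).all (fun i =>
      ((List.range i).any (fun j => pvTrig (causes.getD j [])))
        || pvWF (causes.getD i []))) = true
instance (causes : List (List (String × String))) : Decidable (Pre_assess_division_priority_py causes) := by unfold Pre_assess_division_priority_py; infer_instance
def pvWitness_assess_division_priority_py : (List (List (String × String))) :=
  [[("fix_complexity", "low"), ("pattern_type", "god_object")],
   [("fix_complexity", "medium"), ("pattern_type", "coupling")]]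
def Spec_assess_division_priority_py (causes : List (List (String × String))) (out : String) : Prop := out = assess_division_priority_py_alt causes
instance (causes : List (List (String × String))) (out : String) : Decidable (Spec_assess_division_priority_py causes out) := by unfold Spec_assess_division_priority_py; infer_instance

-- ===== CLAIM (what is proved, stated in full; the proofs are below) =====
def Claim_equal_assess_division_priority_py : Prop := ∀ (causes : List (List (String × String))), Dom_assess_division_priority_py causes → Pre_assess_division_priority_py causes → Spec_assess_division_priority_py causes (assess_division_priority_py causes)

-- ===== LEMMAS AND PROOFS =====
lemma pvBLoop_eq (causes : List (List (String × String))) (m : Bool) :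
    pvBLoop causes m =
      match pvALoop1 causes with
      | some r => r
      | none => if m then "medium" else pvALoop2 causes := by
  induction causes generalizing m with
  | nil => cases m <;> simp [pvBLoop, pvALoop1, pvALoop2]
  | cons cause rest ih =>
    by_cases h : pvBTrig cause = true
    · have h' : pvATrig cause = true := h
      simp [pvBLoop, pvALoop1, h, h']
    · have h' : ¬ pvATrig cause = true := h
      simp only [pvBLoop, pvALoop1, pvALoop2, h, h', if_neg, Bool.false_eq_true,
        not_false_eq_true, pvBMed]
      rw [ih]
      cases hA : pvALoop1 rest with
      | some r => rfl
      | none =>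
        cases m <;>
          by_cases hm : ((pvGetKey cause "fix_complexity").getD "" == "medium") = true <;>
          simp [hm]
-- ===== VERDICT (by name: the statement is the Claim_ definition above) =====
theorem assess_division_priority_py_spec : Claim_equal_assess_division_priority_py := by
  intro causes _ _
  unfold Spec_assess_division_priority_py assess_division_priority_py assess_division_priority_py_alt
  rw [pvBLoop_eq]
  simp
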